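-- pv_equiv track=rewrite | github.com/fvazquezf/rp-taxi | run.py | generate_facts
-- ===== SOURCE A (Python) =====
-- def generate_facts(rows, cols, grid):
--     """Generates ASP facts based on the grid content."""
--     facts = []
--     facts.append(f"row(1..{rows}). col(1..{cols}).")
--
--     walls, stations, taxis, passengers = [], [], [], []
--
--     for r, line in enumerate(grid):
--         for c, char in enumerate(line):
--             x, y = r + 1, c + 1
--             if char == '#':
--                 walls.append(f"wall({x},{y}).")
--             elif char == 'X':
--                 stations.append(f"station({x},{y}).")
--             elif 'a' <= char <= 'z':
--                 passengers.append(f"passenger({char}).")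
--                 passengers.append(f"init(passenger_at({char},{x},{y})).")
--             elif '1' <= char <= '9':
--                 taxis.append(f"taxi({char}).")
--                 taxis.append(f"init(at({char},{x},{y})).")
--
--     if walls: facts.append("\n% Walls\n" + "\n".join(walls))
--     if stations: facts.append("\n% Stations\n" + "\n".join(stations))
--     if taxis: facts.append("\n% Taxis\n" + "\n".join(taxis))
--     if passengers: facts.append("\n% Passengers\n" + "\n".join(passengers))
--
--     return "\n".join(facts)
-- ===== SOURCE B (Python) =====
-- def generate_facts(rows, cols, grid):
--     """Four independent category scans over the flattened grid instead of one classifying loop."""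
--     cells = [(r + 1, c + 1, ch) for r, line in enumerate(grid) for c, ch in enumerate(line)]
--     walls = [f"wall({x},{y})." for x, y, ch in cells if ch == '#']
--     stations = [f"station({x},{y})." for x, y, ch in cells if ch == 'X']
--     taxis = [f for x, y, ch in cells if '1' <= ch <= '9'
--              for f in (f"taxi({ch}).", f"init(at({ch},{x},{y})).")]
--     passengers = [f for x, y, ch in cells if 'a' <= ch <= 'z'
--                   for f in (f"passenger({ch}).", f"init(passenger_at({ch},{x},{y})).")]
--     sections = [("\n% Walls\n", walls), ("\n% Stations\n", stations),
--                 ("\n% Taxis\n", taxis), ("\n% Passengers\n", passengers)]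
--     facts = [f"row(1..{rows}). col(1..{cols})."] + \
--             [hdr + "\n".join(sec) for hdr, sec in sections if sec]
--     return "\n".join(facts)
-- ===== Notes on version B (the rewrite author's own statement) =====
-- stated objective: alternative
-- what changed: Replaces the single classifying loop with four accumulators by four independent category scans over a flattened cell list (comprehensions per category), relying on the categories being mutually exclusive.
import Mathlib
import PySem

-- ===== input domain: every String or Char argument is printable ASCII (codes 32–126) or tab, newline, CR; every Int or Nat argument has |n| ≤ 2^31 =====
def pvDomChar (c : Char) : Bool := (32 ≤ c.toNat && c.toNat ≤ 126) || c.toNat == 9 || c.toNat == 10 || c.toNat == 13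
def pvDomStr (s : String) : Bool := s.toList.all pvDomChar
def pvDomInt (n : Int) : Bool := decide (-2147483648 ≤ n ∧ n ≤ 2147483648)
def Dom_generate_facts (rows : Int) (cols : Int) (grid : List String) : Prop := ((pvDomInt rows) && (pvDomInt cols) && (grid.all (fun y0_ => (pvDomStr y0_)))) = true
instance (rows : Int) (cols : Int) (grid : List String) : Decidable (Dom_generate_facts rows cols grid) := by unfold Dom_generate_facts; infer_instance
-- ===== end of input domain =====

-- B replaces A's single classifying loop (four accumulators) by four independent
-- per-category scans over a flattened cell list; same output (objective: alternative).

-- ===== PORT A =====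
-- shared fact formatters (the f-strings appearing in both Pythons)
def gfHeader (rows cols : Int) : String :=
  "row(1.." ++ PySem.Int.toStr rows ++ "). col(1.." ++ PySem.Int.toStr cols ++ ")."
def gfWall (x y : Int) : String :=
  "wall(" ++ PySem.Int.toStr x ++ "," ++ PySem.Int.toStr y ++ ")."
def gfStation (x y : Int) : String :=
  "station(" ++ PySem.Int.toStr x ++ "," ++ PySem.Int.toStr y ++ ")."
def gfPassenger (ch : Char) : String := "passenger(" ++ String.ofList [ch] ++ ")."
def gfPassInit (ch : Char) (x y : Int) : String :=
  "init(passenger_at(" ++ String.ofList [ch] ++ "," ++ PySem.Int.toStr x ++ "," ++ PySem.Int.toStr y ++ "))."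
def gfTaxi (ch : Char) : String := "taxi(" ++ String.ofList [ch] ++ ")."
def gfTaxiInit (ch : Char) (x y : Int) : String :=
  "init(at(" ++ String.ofList [ch] ++ "," ++ PySem.Int.toStr x ++ "," ++ PySem.Int.toStr y ++ "))."

-- A's classifying if-chain on one cell, over the 4-accumulator state
def gfStep (x y : Int) (ch : Char)
    (st : List String × List String × List String × List String) :
    List String × List String × List String × List String :=
  let (walls, stations, taxis, passengers) := st
  if ch = '#' then (walls ++ [gfWall x y], stations, taxis, passengers)
  else if ch = 'X' then (walls, stations ++ [gfStation x y], taxis, passengers)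
  else if 'a' ≤ ch ∧ ch ≤ 'z' then
    (walls, stations, taxis, passengers ++ [gfPassenger ch, gfPassInit ch x y])
  else if '1' ≤ ch ∧ ch ≤ '9' then
    (walls, stations, taxis ++ [gfTaxi ch, gfTaxiInit ch x y], passengers)
  else (walls, stations, taxis, passengers)

def generate_facts (rows : Int) (cols : Int) (grid : List String) : String :=
  let facts : List String := [gfHeader rows cols]
  let st :=
    (PySem.List.enumerate grid 0).foldl
      (fun st rl =>
        (PySem.List.enumerate rl.2.toList 0).foldl
          (fun st cc => gfStep (rl.1 + 1) (cc.1 + 1) cc.2 st) st)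
      ([], [], [], [])
  let (walls, stations, taxis, passengers) := st
  let facts := if walls ≠ [] then facts ++ ["\n% Walls\n" ++ PySem.Str.join "\n" walls] else facts
  let facts := if stations ≠ [] then facts ++ ["\n% Stations\n" ++ PySem.Str.join "\n" stations] else facts
  let facts := if taxis ≠ [] then facts ++ ["\n% Taxis\n" ++ PySem.Str.join "\n" taxis] else facts
  let facts := if passengers ≠ [] then facts ++ ["\n% Passengers\n" ++ PySem.Str.join "\n" passengers] else facts
  PySem.Str.join "\n" facts

-- ===== PORT B =====
def gfCells (grid : List String) : List (Int × Int × Char) :=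
  (PySem.List.enumerate grid 0).flatMap
    (fun rl => (PySem.List.enumerate rl.2.toList 0).map (fun cc => (rl.1 + 1, cc.1 + 1, cc.2)))

-- the four per-category scans (B's comprehensions)
def gfW (cells : List (Int × Int × Char)) : List String :=
  cells.filterMap (fun c => if c.2.2 = '#' then some (gfWall c.1 c.2.1) else none)
def gfS (cells : List (Int × Int × Char)) : List String :=
  cells.filterMap (fun c => if c.2.2 = 'X' then some (gfStation c.1 c.2.1) else none)
def gfT (cells : List (Int × Int × Char)) : List String :=
  cells.flatMap (fun c =>
    if '1' ≤ c.2.2 ∧ c.2.2 ≤ '9' then [gfTaxi c.2.2, gfTaxiInit c.2.2 c.1 c.2.1] else [])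
def gfP (cells : List (Int × Int × Char)) : List String :=
  cells.flatMap (fun c =>
    if 'a' ≤ c.2.2 ∧ c.2.2 ≤ 'z' then [gfPassenger c.2.2, gfPassInit c.2.2 c.1 c.2.1] else [])

def generate_facts_alt (rows : Int) (cols : Int) (grid : List String) : String :=
  let cells := gfCells grid
  let sections := [("\n% Walls\n", gfW cells), ("\n% Stations\n", gfS cells),
                   ("\n% Taxis\n", gfT cells), ("\n% Passengers\n", gfP cells)]
  let facts := [gfHeader rows cols] ++
    sections.filterMap (fun s => if s.2 ≠ [] then some (s.1 ++ PySem.Str.join "\n" s.2) else none)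
  PySem.Str.join "\n" facts

-- ===== PRECONDITION & SPEC =====
def Spec_generate_facts (rows : Int) (cols : Int) (grid : List String) (out : String) : Prop := out = generate_facts_alt rows cols grid
instance (rows : Int) (cols : Int) (grid : List String) (out : String) : Decidable (Spec_generate_facts rows cols grid out) := by unfold Spec_generate_facts; infer_instance

-- ===== CLAIM (what is proved, stated in full; the proofs are below) =====
def Claim_equal_generate_facts : Prop := ∀ (rows : Int) (cols : Int) (grid : List String), Dom_generate_facts rows cols grid → Spec_generate_facts rows cols grid (generate_facts rows cols grid)

-- ===== LEMMAS AND PROOFS =====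

-- the single-pass fold over a cell list equals the four independent scans
theorem gf_fold_eq (cells : List (Int × Int × Char))
    (w s t p : List String) :
    cells.foldl (fun st c => gfStep c.1 c.2.1 c.2.2 st) (w, s, t, p) =
      (w ++ gfW cells, s ++ gfS cells, t ++ gfT cells, p ++ gfP cells) := by
  induction cells generalizing w s t p with
  | nil => simp [gfW, gfS, gfT, gfP]
  | cons c cs ih =>
    obtain ⟨x, y, ch⟩ := c
    rw [List.foldl_cons]
    by_cases h1 : ch = '#'
    · rw [show gfStep x y ch (w, s, t, p) = (w ++ [gfWall x y], s, t, p) from by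
        simp [gfStep, h1], ih]
      simp [gfW, gfS, gfT, gfP, h1]
    · by_cases h2 : ch = 'X'
      · rw [show gfStep x y ch (w, s, t, p) = (w, s ++ [gfStation x y], t, p) from by
          simp [gfStep, h2], ih]
        simp [gfW, gfS, gfT, gfP, h2]
      · by_cases h3 : 'a' ≤ ch ∧ ch ≤ 'z'
        · have h4 : ¬ ('1' ≤ ch ∧ ch ≤ '9') := by
            rcases h3 with ⟨ha, hz⟩
            intro ⟨_, h9⟩
            exact absurd (le_trans ha h9) (by decide)
          rw [show gfStep x y ch (w, s, t, p) =
              (w, s, t, p ++ [gfPassenger ch, gfPassInit ch x y]) from by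
            simp [gfStep, h1, h2, h3], ih]
          simp [gfW, gfS, gfT, gfP, h1, h2, h3, h4]
        · by_cases h4 : '1' ≤ ch ∧ ch ≤ '9'
          · rw [show gfStep x y ch (w, s, t, p) =
                (w, s, t ++ [gfTaxi ch, gfTaxiInit ch x y], p) from by
              simp [gfStep, h1, h2, h3, h4], ih]
            simp [gfW, gfS, gfT, gfP, h1, h2, h3, h4]
          · rw [show gfStep x y ch (w, s, t, p) = (w, s, t, p) from by
              simp [gfStep, h1, h2, h3, h4], ih]
            simp [gfW, gfS, gfT, gfP, h1, h2, h3, h4]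

-- A's nested enumerate-fold is the fold over the flattened cell list
theorem gf_nested_eq (grid : List String) (init : List String × List String × List String × List String) :
    (PySem.List.enumerate grid 0).foldl
      (fun st rl =>
        (PySem.List.enumerate rl.2.toList 0).foldl
          (fun st cc => gfStep (rl.1 + 1) (cc.1 + 1) cc.2 st) st) init =
    (gfCells grid).foldl (fun st c => gfStep c.1 c.2.1 c.2.2 st) init := by
  have key : ∀ (l : List (Int × String)) (init : List String × List String × List String × List String),
      l.foldl (fun st rl =>
        (PySem.List.enumerate rl.2.toList 0).foldl
          (fun st cc => gfStep (rl.1 + 1) (cc.1 + 1) cc.2 st) st) init =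
      (l.flatMap (fun rl => (PySem.List.enumerate rl.2.toList 0).map
          (fun cc => (rl.1 + 1, cc.1 + 1, cc.2)))).foldl
        (fun st c => gfStep c.1 c.2.1 c.2.2 st) init := by
    intro l
    induction l with
    | nil => intro init; rfl
    | cons rl rest ih =>
      intro init
      simp only [List.foldl_cons, List.flatMap_cons, List.foldl_append, List.foldl_map, ih]
  exact key _ init

-- ===== VERDICT (by name: the statement is the Claim_ definition above) =====
theorem generate_facts_spec : Claim_equal_generate_facts := by
  intro rows cols grid _
  show generate_facts rows cols grid = generate_facts_alt rows cols grid
  unfold generate_facts generate_facts_alt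
  rw [gf_nested_eq, gf_fold_eq]
  simp only [List.nil_append, List.filterMap_cons, List.filterMap_nil]
  by_cases hw : gfW (gfCells grid) = [] <;>
    by_cases hs : gfS (gfCells grid) = [] <;>
      by_cases ht : gfT (gfCells grid) = [] <;>
        by_cases hp : gfP (gfCells grid) = [] <;>
          simp [hw, hs, ht, hp]
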